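-- pv_equiv track=rewrite | github.com/AbstractEndeavors/abstract_essentials | abstract_blockchain/src/abstract_blockchain/rndm/APILaunchNew-main/APILaunchNew-main/grabApis/networkChoose.py | cleanVars
-- ===== SOURCE A (Python) =====
-- def cleanVars(ls):
--     lsN = []
--     for i in range(0,len(ls)):
--         stop = False
--         lsN.append(str(ls[i]))
--         n = 0
--         for k in range(0,len(ls[i])):
--             if ls[i][k] in [' ','\t','\n']:
--                 n = k
--             else:
--                 stop = True
--             if stop == True and ls[i][k] not in [' ','\t','\n']:
--                 lsN[i] = ls[i][n:k+1]
--     return lsN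
-- ===== SOURCE B (Python) =====
-- def cleanVars(ls):
--     ws = (' ', '\t', '\n')
--     out = []
--     for x in ls:
--         end = len(x) - 1
--         while end >= 0 and x[end] in ws:
--             end -= 1
--         if end < 0:
--             out.append(str(x))
--             continue
--         n = end - 1
--         while n >= 0 and x[n] not in ws:
--             n -= 1
--         if n < 0:
--             n = 0
--         out.append(x[n:end + 1])
--     return out
-- ===== Notes on version B (the rewrite author's own statement) =====
-- stated objective: faster
-- what changed: Per element, A scans forward and re-slices the string on every non-whitespace character (quadratic in element length); B does two right-to-left scans (last non-whitespace index, then the nearest whitespace before it) and builds one final slice.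
import Mathlib
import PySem

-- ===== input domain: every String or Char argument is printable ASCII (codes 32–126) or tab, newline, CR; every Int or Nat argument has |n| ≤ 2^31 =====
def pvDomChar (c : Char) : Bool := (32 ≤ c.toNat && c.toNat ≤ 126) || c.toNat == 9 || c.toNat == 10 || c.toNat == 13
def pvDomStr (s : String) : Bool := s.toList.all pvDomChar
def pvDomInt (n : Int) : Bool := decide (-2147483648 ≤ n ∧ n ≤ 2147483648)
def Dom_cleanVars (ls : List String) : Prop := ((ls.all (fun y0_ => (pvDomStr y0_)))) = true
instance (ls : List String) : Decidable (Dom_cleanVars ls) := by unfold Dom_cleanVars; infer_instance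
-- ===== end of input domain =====

-- B replaces A's forward per-character pass (which re-slices on every non-whitespace character)
-- by two right-to-left scans and a single final slice per element (objective: faster, constant/structural).

-- c in [' ', '\t', '\n']  (shared character test; '\r' is NOT whitespace for this function)
def wsChar (c : Char) : Bool := c == ' ' || c == '\t' || c == '\n'

-- ===== PORT A =====
-- literal transliteration of A: outer loop appends str(ls[i]) then the inner loop
-- over k repeatedly overwrites lsN[i] with ls[i][n:k+1].
def cleanVars (ls : List String) : List String :=
  (PySem.List.pyRange 0 (ls.length : Int) 1).foldl (fun lsN i =>
    let x := PySem.List.pyGetD ls i ""        -- ls[i]; i is always in range here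
    let cs := x.toList
    let r := (PySem.List.pyRange 0 (cs.length : Int) 1).foldl
      (fun (st : Bool × Int × List String) k =>
        let c := PySem.List.pyGetD cs k ' '   -- ls[i][k]; k is always in range here
        let n' := if wsChar c then k else st.2.1
        let stop' := if wsChar c then st.1 else true
        let lsN' := if stop' && !(wsChar c) then
            st.2.2.set i.toNat (String.ofList (PySem.List.slice cs (some n') (some (k + 1))))
          else st.2.2
        (stop', n', lsN'))
      (false, 0, lsN ++ [x])                  -- stop = False; lsN.append(str(ls[i])); n = 0
    r.2.2) []

-- ===== PORT B =====
-- while end >= 0 and x[end] in ws: end -= 1   (argument j = end + 1, so j = 0 means end = -1)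
def bScanEnd (cs : List Char) : Nat → Int
  | 0 => -1
  | j + 1 => if wsChar (cs.getD j ' ') then bScanEnd cs j else (j : Int)

-- while n >= 0 and x[n] not in ws: n -= 1   (argument j = n + 1)
def bScanWs (cs : List Char) : Nat → Int
  | 0 => -1
  | j + 1 => if !(wsChar (cs.getD j ' ')) then bScanWs cs j else (j : Int)

def cleanElem (x : String) : String :=
  let cs := x.toList
  let e := bScanEnd cs cs.length
  if e < 0 then x                             -- all-whitespace (or empty): keep str(x)
  else
    let n0 := bScanWs cs e.toNat
    let n : Int := if n0 < 0 then 0 else n0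
    String.ofList (PySem.List.slice cs (some n) (some (e + 1)))

def cleanVars_alt (ls : List String) : List String := ls.map cleanElem

-- ===== PRECONDITION & SPEC =====
def Spec_cleanVars (ls : List String) (out : List String) : Prop := out = cleanVars_alt ls
instance (ls : List String) (out : List String) : Decidable (Spec_cleanVars ls out) := by unfold Spec_cleanVars; infer_instance

-- ===== CLAIM (what is proved, stated in full; the proofs are below) =====
def Claim_equal_cleanVars : Prop := ∀ (ls : List String), Dom_cleanVars ls → Spec_cleanVars ls (cleanVars ls)

-- ===== LEMMAS AND PROOFS =====

-- the value A's inner loop leaves in lsN[i], expressed through B's scanners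
def innerVal (cs : List Char) (x : String) (m : Nat) : String :=
  if bScanEnd cs m < 0 then x
  else
    String.ofList (PySem.List.slice cs
      (some (if bScanWs cs (bScanEnd cs m).toNat < 0 then 0
             else bScanWs cs (bScanEnd cs m).toNat))
      (some (bScanEnd cs m + 1)))

theorem inner_inv (cs : List Char) (x : String) (l0 : List String) (idx : Nat)
    (hidx : idx = l0.length) (m : Nat) :
    (PySem.List.pyRange 0 (m : Int) 1).foldl
      (fun (st : Bool × Int × List String) k =>
        let c := PySem.List.pyGetD cs k ' '
        let n' := if wsChar c then k else st.2.1
        let stop' := if wsChar c then st.1 else true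
        let lsN' := if stop' && !(wsChar c) then
            st.2.2.set idx (String.ofList (PySem.List.slice cs (some n') (some (k + 1))))
          else st.2.2
        (stop', n', lsN'))
      (false, 0, l0 ++ [x]) =
    (decide (0 ≤ bScanEnd cs m),
     (if bScanWs cs m < 0 then 0 else bScanWs cs m),
     l0 ++ [innerVal cs x m]) := by
  induction m with
  | zero =>
    simp [PySem.List.pyRange_one_eq_nil (by omega : (0:Int) ≤ 0), innerVal, bScanEnd, bScanWs]
  | succ j ih =>
    have hcast : ((j + 1 : Nat) : Int) = (j : Int) + 1 := by push_cast; ring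
    rw [hcast, PySem.List.pyRange_one_succ_right (by positivity), List.foldl_append, ih]
    simp only [List.foldl_cons, List.foldl_nil, PySem.List.pyGetD_natCast, List.getD]
    have hj0 : ¬ ((j : Int) < 0) := by omega
    by_cases hw : wsChar (cs[j]?.getD ' ')
    · simp only [hw, if_true, Bool.not_true, Bool.and_false]
      simp [bScanEnd, bScanWs, innerVal, List.getD, hw]
    · simp only [hw, Bool.not_false, Bool.and_true]
      simp [bScanEnd, bScanWs, innerVal, List.getD, hw, hj0, hidx]

theorem cleanElem_eq_innerVal (x : String) :
    cleanElem x = innerVal x.toList x x.toList.length := by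
  simp only [cleanElem, innerVal]

theorem outer_inv (ls : List String) (m : Nat) (hm : m ≤ ls.length) :
    (PySem.List.pyRange 0 (m : Int) 1).foldl (fun lsN i =>
      let x := PySem.List.pyGetD ls i ""
      let cs := x.toList
      let r := (PySem.List.pyRange 0 (cs.length : Int) 1).foldl
        (fun (st : Bool × Int × List String) k =>
          let c := PySem.List.pyGetD cs k ' '
          let n' := if wsChar c then k else st.2.1
          let stop' := if wsChar c then st.1 else true
          let lsN' := if stop' && !(wsChar c) then
              st.2.2.set i.toNat (String.ofList (PySem.List.slice cs (some n') (some (k + 1))))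
            else st.2.2
          (stop', n', lsN'))
        (false, 0, lsN ++ [x])
      r.2.2) [] = (ls.take m).map cleanElem := by
  induction m with
  | zero => simp [PySem.List.pyRange_one_eq_nil (by omega : (0:Int) ≤ 0)]
  | succ j ih =>
    have hj : j ≤ ls.length := Nat.le_of_succ_le hm
    have hjl : j < ls.length := hm
    have hcast : ((j + 1 : Nat) : Int) = (j : Int) + 1 := by push_cast; ring
    rw [hcast, PySem.List.pyRange_one_succ_right (by positivity), List.foldl_append, ih hj]
    simp only [List.foldl_cons, List.foldl_nil, PySem.List.pyGetD_natCast]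
    have hx : ls.getD j "" = ls[j] := List.getD_eq_getElem ls "" hjl
    have hlen : ((j : Int)).toNat = ((ls.take j).map cleanElem).length := by
      simp [List.length_take, Nat.min_eq_left hj]
    rw [hx, inner_inv (ls[j]).toList (ls[j]) ((ls.take j).map cleanElem) _ hlen]
    have ht : ls.take (j + 1) = ls.take j ++ [ls[j]] := by
      rw [List.take_add_one, List.getElem?_eq_getElem hjl]; rfl
    simp only [ht, List.map_append, List.map_cons, List.map_nil, cleanElem_eq_innerVal]

-- ===== VERDICT (by name: the statement is the Claim_ definition above) =====
theorem cleanVars_spec : Claim_equal_cleanVars := by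
  intro ls _
  unfold Spec_cleanVars cleanVars cleanVars_alt
  have h := outer_inv ls ls.length le_rfl
  simp only [List.take_length] at h
  exact h
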